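-- pv_equiv track=rewrite | github.com/dsb-ifi/glzn | glzn/data/dataset.py | _has_distinct_slot_assignment
-- ===== SOURCE A (Python) =====
-- def _has_distinct_slot_assignment(
--
--     slot_candidates:dict[int, tuple[str,...]]
-- ) -> bool:
--     slots = sorted(slot_candidates.keys(), key=lambda i: len(slot_candidates[i]))
--     used:set[str] = set()
--
--     def _dfs(k:int) -> bool:
--         if k == len(slots):
--             return True
--         slot = slots[k]
--         for prefix in slot_candidates[slot]:
--             if prefix in used:
--                 continue
--             used.add(prefix)
--             if _dfs(k + 1):
--                 return True
--             used.remove(prefix)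
--         return False
--
--     return _dfs(0)
-- ===== SOURCE B (Python) =====
-- def _has_distinct_slot_assignment(
--
--     slot_candidates:dict[int, tuple[str,...]]
-- ) -> bool:
--     def _solvable(lists):
--         if not lists:
--             return True
--         first, rest = lists[0], lists[1:]
--         for p in first:
--             if _solvable([[q for q in c if q != p] for c in rest]):
--                 return True
--         return False
--
--     lists = sorted(slot_candidates.values(), key=len)
--     return _solvable([list(c) for c in lists])
-- ===== Notes on version B (the rewrite author's own statement) =====
-- stated objective: alternative
-- what changed: Replaces the index-based DFS over sorted slot keys with a shared mutable 'used' set by a reduce-and-conquer recursion on the list of candidate tuples that picks a representative for the first list and filters it out of all remaining lists (no used set, no slot indices).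
import Mathlib
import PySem

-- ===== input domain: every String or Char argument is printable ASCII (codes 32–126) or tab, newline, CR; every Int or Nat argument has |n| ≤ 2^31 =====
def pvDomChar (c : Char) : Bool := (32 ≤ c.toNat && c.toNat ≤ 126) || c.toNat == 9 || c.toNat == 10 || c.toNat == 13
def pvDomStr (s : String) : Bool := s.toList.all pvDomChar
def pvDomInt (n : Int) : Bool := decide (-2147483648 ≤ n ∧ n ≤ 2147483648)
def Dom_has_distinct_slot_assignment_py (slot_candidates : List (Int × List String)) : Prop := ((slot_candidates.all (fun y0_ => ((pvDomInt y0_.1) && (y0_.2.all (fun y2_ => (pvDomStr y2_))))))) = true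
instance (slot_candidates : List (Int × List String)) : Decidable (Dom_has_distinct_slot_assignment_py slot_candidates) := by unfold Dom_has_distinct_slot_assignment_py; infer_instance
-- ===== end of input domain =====

-- B replaces A's index-based DFS with a shared 'used' set by a reduce-and-conquer
-- recursion that picks a representative for the first candidate list and filters it
-- out of the remaining lists (objective: alternative; same worst-case cost).

-- ===== PORT A =====
-- the closure _dfs: pyAdfs handles 'if k == len(slots) … slot = slots[k]' (recursion on
-- the remaining suffix of slots), pyAtry is its 'for prefix in slot_candidates[slot]' loop
-- (the 'used.remove' on backtracking is implicit: 'used' is passed functionally).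
mutual
def pyAdfs (d : PySem.Dict Int (List String)) : List Int → PySem.Set String → Bool
  | [], _ => true
  | slot :: rest, used => pyAtry d (d.getD slot []) rest used
termination_by l _ => ((l.length, 0, 0) : Nat ×ₗ Nat ×ₗ Nat)
def pyAtry (d : PySem.Dict Int (List String)) : List String → List Int → PySem.Set String → Bool
  | [], _, _ => false
  | p :: ps, rest, used =>
      if PySem.Set.contains used p then pyAtry d ps rest used
      else if pyAdfs d rest (PySem.Set.add used p) then true
      else pyAtry d ps rest used
termination_by ps l _ => ((l.length, 1, ps.length) : Nat ×ₗ Nat ×ₗ Nat)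
end

def has_distinct_slot_assignment_py (slot_candidates : List (Int × List String)) : Bool :=
  let d : PySem.Dict Int (List String) := PySem.Dict.mk slot_candidates
  let slots := PySem.List.sorted (PySem.Dict.keys d) (fun i => (d.getD i []).length) false
  pyAdfs d slots PySem.Set.empty

-- ===== PORT B =====
def solvableB : List (List String) → Bool
  | [] => true
  | c :: cs => c.any (fun p => solvableB (cs.map (fun l => l.filter (fun q => q != p))))
termination_by l => l.length
decreasing_by simp

def has_distinct_slot_assignment_py_alt (slot_candidates : List (Int × List String)) : Bool :=
  solvableB (PySem.List.sorted (PySem.Dict.values (PySem.Dict.mk slot_candidates)) (fun l => l.length) false)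

-- ===== PRECONDITION & SPEC =====
-- Pre_ excludes association lists with duplicate keys: they do not represent any Python
-- dict (the parameter is dict[int, tuple[str,...]], whose keys are necessarily distinct).
def Pre_has_distinct_slot_assignment_py (slot_candidates : List (Int × List String)) : Prop :=
  (slot_candidates.map Prod.fst).Nodup
instance (slot_candidates : List (Int × List String)) : Decidable (Pre_has_distinct_slot_assignment_py slot_candidates) := by unfold Pre_has_distinct_slot_assignment_py; infer_instance

def pvWitness_has_distinct_slot_assignment_py : (List (Int × List String)) :=
  [(0, ["a"]), (1, ["a", "b"])]

def Spec_has_distinct_slot_assignment_py (slot_candidates : List (Int × List String)) (out : Bool) : Prop := out = has_distinct_slot_assignment_py_alt slot_candidates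
instance (slot_candidates : List (Int × List String)) (out : Bool) : Decidable (Spec_has_distinct_slot_assignment_py slot_candidates out) := by unfold Spec_has_distinct_slot_assignment_py; infer_instance

-- ===== CLAIM (what is proved, stated in full; the proofs are below) =====
def Claim_equal_has_distinct_slot_assignment_py : Prop := ∀ (slot_candidates : List (Int × List String)), Dom_has_distinct_slot_assignment_py slot_candidates → Pre_has_distinct_slot_assignment_py slot_candidates → Spec_has_distinct_slot_assignment_py slot_candidates (has_distinct_slot_assignment_py slot_candidates)

-- ===== LEMMAS AND PROOFS =====

-- A system of distinct representatives: a Nodup list of picks, pointwise members.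
def SDR (cs : List (List String)) : Prop :=
  ∃ picks : List String, picks.Nodup ∧ List.Forall₂ (· ∈ ·) picks cs

-- SDR avoiding a set of already-used strings (the state of A's search).
def SDRav (u : PySem.Set String) (cs : List (List String)) : Prop :=
  ∃ picks : List String, picks.Nodup ∧ (∀ q ∈ picks, ¬ q ∈ u) ∧ List.Forall₂ (· ∈ ·) picks cs

theorem sdr_nil : SDR [] := ⟨[], List.nodup_nil, List.Forall₂.nil⟩

theorem sdrav_nil (u : PySem.Set String) : SDRav u [] :=
  ⟨[], List.nodup_nil, by simp, List.Forall₂.nil⟩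

theorem forall2_mem_left {α β : Type} {R : α → β → Prop} {ps : List α} {cs : List β}
    (h : List.Forall₂ R ps cs) {q : α} (hq : q ∈ ps) : ∃ l ∈ cs, R q l := by
  induction h with
  | nil => simp at hq
  | cons hr _ ih =>
      rcases List.mem_cons.mp hq with rfl | hq'
      · exact ⟨_, List.mem_cons_self .., hr⟩
      · obtain ⟨l, hl, hrl⟩ := ih hq'; exact ⟨l, List.mem_cons_of_mem _ hl, hrl⟩

theorem forall2_filter {p : String} {ps : List String} {cs : List (List String)}
    (hps : p ∉ ps) (hf : List.Forall₂ (· ∈ ·) ps cs) :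
    List.Forall₂ (fun (q : String) (l : List String) => q ∈ l.filter (fun x => x != p)) ps cs := by
  induction hf with
  | nil => exact List.Forall₂.nil
  | cons hr htl ih =>
      rename_i a b l₁ l₂
      refine List.Forall₂.cons ?_ (ih (fun h => hps (List.mem_cons_of_mem _ h)))
      exact List.mem_filter.mpr ⟨hr, bne_iff_ne.mpr (fun h => hps (h ▸ List.mem_cons_self ..))⟩

theorem map_perm_lift {α β : Type} (f : α → β) {m m' : List β} (h : m.Perm m') :
    ∀ {l : List α}, l.map f = m → ∃ l', l.Perm l' ∧ l'.map f = m' := by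
  induction h with
  | nil => intro l he; exact ⟨l, List.Perm.refl l, he⟩
  | cons b _ ih =>
      intro l he
      cases l with
      | nil => simp at he
      | cons x xs =>
          simp only [List.map_cons, List.cons.injEq] at he
          obtain ⟨xs', hp, hm⟩ := ih he.2
          exact ⟨x :: xs', List.Perm.cons x hp, by simp [hm, he.1]⟩
  | swap a b t =>
      intro l he
      cases l with
      | nil => simp at he
      | cons x ys =>
          cases ys with
          | nil => simp at he
          | cons y zs =>
              simp only [List.map_cons, List.cons.injEq] at he
              exact ⟨y :: x :: zs, List.Perm.swap y x zs, by simp [he.1, he.2.1, he.2.2]⟩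
  | trans _ _ ih1 ih2 =>
      intro l he
      obtain ⟨l1, hp1, hm1⟩ := ih1 he
      obtain ⟨l2, hp2, hm2⟩ := ih2 hm1
      exact ⟨l2, hp1.trans hp2, hm2⟩

theorem sdr_perm {cs cs' : List (List String)} (h : cs.Perm cs') : SDR cs → SDR cs' := by
  rintro ⟨picks, hnd, hf⟩
  have hlen := hf.length_eq
  have hzf : ∀ a b, (a, b) ∈ picks.zip cs → a ∈ b :=
    fun a b hab => (List.forall₂_iff_zip.mp hf).2 hab
  obtain ⟨pcs', hp, hm⟩ := map_perm_lift Prod.snd h (l := picks.zip cs)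
    (List.map_snd_zip (le_of_eq hlen.symm))
  refine ⟨pcs'.map Prod.fst, ?_, ?_⟩
  · have hpp : picks.Perm (pcs'.map Prod.fst) := by
      have := hp.map Prod.fst
      rwa [List.map_fst_zip (le_of_eq hlen)] at this
    exact hpp.nodup hnd
  · rw [List.forall₂_iff_zip]
    constructor
    · simp [← hm]
    · intro a b hab
      rw [← hm, ← List.zip_of_prod (l := pcs'.map Prod.fst) (l' := pcs'.map Prod.snd) rfl rfl] at hab
      exact hzf a b (hp.symm.mem_iff.mp hab)

theorem sdrav_cons (u : PySem.Set String) (c : List String) (cs : List (List String)) :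
    SDRav u (c :: cs) ↔ ∃ p, p ∈ c ∧ ¬ p ∈ u ∧ SDRav (PySem.Set.add u p) cs := by
  constructor
  · rintro ⟨picks, hnd, hav, hf⟩
    cases hf with
    | cons hpc hf' =>
        rename_i p ps
        refine ⟨p, hpc, hav p (List.mem_cons_self ..), ps, (List.nodup_cons.mp hnd).2, ?_, hf'⟩
        intro q hq
        rw [PySem.Set.mem_add u p q]
        rintro (hqu | rfl)
        · exact hav q (List.mem_cons_of_mem _ hq) hqu
        · exact (List.nodup_cons.mp hnd).1 hq
  · rintro ⟨p, hpc, hpu, ps, hnd, hav, hf⟩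
    refine ⟨p :: ps, ?_, ?_, List.Forall₂.cons hpc hf⟩
    · rw [List.nodup_cons]
      refine ⟨fun hp => ?_, hnd⟩
      exact hav p hp ((PySem.Set.mem_add u p p).mpr (Or.inr rfl))
    · intro q hq
      rcases List.mem_cons.mp hq with rfl | hq'
      · exact hpu
      · exact fun hqu => hav q hq' ((PySem.Set.mem_add u p q).mpr (Or.inl hqu))

theorem sdr_cons_filter (c : List String) (cs : List (List String)) :
    SDR (c :: cs) ↔ ∃ p, p ∈ c ∧ SDR (cs.map (fun l => l.filter (fun q => q != p))) := by
  constructor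
  · rintro ⟨picks, hnd, hf⟩
    cases hf with
    | cons hpc hf' =>
        rename_i p ps
        obtain ⟨hps, hnd'⟩ := List.nodup_cons.mp hnd
        refine ⟨p, hpc, ps, hnd', ?_⟩
        rw [List.forall₂_map_right_iff]
        exact forall2_filter hps hf'
  · rintro ⟨p, hpc, ps, hnd, hf⟩
    rw [List.forall₂_map_right_iff] at hf
    refine ⟨p :: ps, ?_, List.Forall₂.cons hpc (hf.imp ?_)⟩
    · rw [List.nodup_cons]
      refine ⟨fun hp => ?_, hnd⟩
      obtain ⟨l, _, hpl⟩ := forall2_mem_left hf hp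
      have := (List.mem_filter.mp hpl).2
      simp at this
    · intro a b hab
      exact (List.mem_filter.mp hab).1

theorem solvableB_iff_aux : ∀ (n : Nat) (cs : List (List String)), cs.length ≤ n →
    (solvableB cs = true ↔ SDR cs) := by
  intro n
  induction n with
  | zero =>
      intro cs h
      have hcs : cs = [] := List.eq_nil_of_length_eq_zero (Nat.le_zero.mp h)
      subst hcs
      simp only [solvableB]
      exact iff_of_true trivial sdr_nil
  | succ n ih =>
      intro cs h
      cases cs with
      | nil => simp only [solvableB]; exact iff_of_true trivial sdr_nil
      | cons c cs' =>
          rw [solvableB, List.any_eq_true, sdr_cons_filter]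
          constructor
          · rintro ⟨p, hp, hsol⟩
            exact ⟨p, hp, (ih _ (by simp at h ⊢; omega)).mp hsol⟩
          · rintro ⟨p, hp, hsdr⟩
            exact ⟨p, hp, (ih _ (by simp at h ⊢; omega)).mpr hsdr⟩

theorem solvableB_iff (cs : List (List String)) : solvableB cs = true ↔ SDR cs :=
  solvableB_iff_aux cs.length cs (le_refl _)

theorem pyAdfs_iff (d : PySem.Dict Int (List String)) :
    ∀ (l : List Int) (u : PySem.Set String),
    (pyAdfs d l u = true ↔ SDRav u (l.map (fun s => d.getD s []))) := by
  intro l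
  induction l with
  | nil =>
      intro u
      simp only [pyAdfs, List.map_nil]
      exact iff_of_true trivial (sdrav_nil u)
  | cons slot rest ih =>
      intro u
      have htry : ∀ (ps : List String) (u : PySem.Set String),
          (pyAtry d ps rest u = true ↔
            ∃ p ∈ ps, ¬ p ∈ u ∧ SDRav (PySem.Set.add u p) (rest.map (fun s => d.getD s []))) := by
        intro ps
        induction ps with
        | nil => intro u; simp [pyAtry]
        | cons p ps' ihp =>
            intro u
            rw [pyAtry]
            by_cases hc : p ∈ u
            · rw [if_pos ((PySem.Set.contains_iff u p).mpr hc)]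
              rw [ihp u]
              constructor
              · rintro ⟨q, hq, h1, h2⟩; exact ⟨q, List.mem_cons_of_mem _ hq, h1, h2⟩
              · rintro ⟨q, hq, h1, h2⟩
                rcases List.mem_cons.mp hq with rfl | hq'
                · exact absurd hc h1
                · exact ⟨q, hq', h1, h2⟩
            · rw [if_neg (fun hcc => hc ((PySem.Set.contains_iff u p).mp hcc))]
              by_cases hd : pyAdfs d rest (PySem.Set.add u p) = true
              · rw [if_pos hd]
                exact iff_of_true rfl ⟨p, List.mem_cons_self .., hc, (ih _).mp hd⟩
              · rw [if_neg hd, ihp u]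
                constructor
                · rintro ⟨q, hq, h1, h2⟩; exact ⟨q, List.mem_cons_of_mem _ hq, h1, h2⟩
                · rintro ⟨q, hq, h1, h2⟩
                  rcases List.mem_cons.mp hq with rfl | hq'
                  · exact absurd ((ih _).mpr h2) hd
                  · exact ⟨q, hq', h1, h2⟩
      rw [pyAdfs, htry, List.map_cons, sdrav_cons]

theorem sdrav_empty_iff (cs : List (List String)) : SDRav PySem.Set.empty cs ↔ SDR cs := by
  unfold SDRav SDR
  constructor
  · rintro ⟨picks, hnd, _, hf⟩; exact ⟨picks, hnd, hf⟩
  · rintro ⟨picks, hnd, hf⟩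
    exact ⟨picks, hnd, fun q _ hq => by simp [PySem.Set.empty] at hq, hf⟩

-- ===== VERDICT (by name: the statement is the Claim_ definition above) =====
theorem has_distinct_slot_assignment_py_spec : Claim_equal_has_distinct_slot_assignment_py := by
  intro sc _ hpre
  unfold Spec_has_distinct_slot_assignment_py
  unfold has_distinct_slot_assignment_py has_distinct_slot_assignment_py_alt
  rw [Bool.eq_iff_iff]
  rw [pyAdfs_iff, sdrav_empty_iff, solvableB_iff]
  have hnd : (PySem.Dict.mk sc : PySem.Dict Int (List String)).keys.Nodup := hpre
  have hvals : (PySem.Dict.mk sc : PySem.Dict Int (List String)).values =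
      (PySem.Dict.mk sc : PySem.Dict Int (List String)).keys.map
        (fun k => (PySem.Dict.mk sc : PySem.Dict Int (List String)).getD k []) :=
    PySem.Dict.values_eq_map_keys _ hnd []
  have h1 : ((PySem.List.sorted (PySem.Dict.keys (PySem.Dict.mk sc))
        (fun i => ((PySem.Dict.mk sc : PySem.Dict Int (List String)).getD i []).length) false).map
        (fun s => (PySem.Dict.mk sc : PySem.Dict Int (List String)).getD s [])).Perm
      (PySem.Dict.values (PySem.Dict.mk sc)) := by
    rw [hvals]
    exact (PySem.List.sorted_perm ..).map _
  have h2 : (PySem.List.sorted (PySem.Dict.values (PySem.Dict.mk sc))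
      (fun l => l.length) false).Perm (PySem.Dict.values (PySem.Dict.mk sc)) :=
    PySem.List.sorted_perm ..
  exact ⟨fun h => sdr_perm h2.symm (sdr_perm h1 h), fun h => sdr_perm h1.symm (sdr_perm h2 h)⟩
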